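-- pv_equiv track=rewrite | github.com/naumgh/projectsAndSchool | csc110-Python/python_projects/lists-mutation-starter.py | is_decreasing
-- ===== SOURCE A (Python) =====
-- def is_decreasing(lon):
-- 	if len(lon) == 0:
-- 		return True
-- 	prev = lon[0]
-- 	for n in lon[1:]:
-- 		if(prev != n + 1):
-- 			return False
-- 		prev = n
-- 	return True
-- ===== SOURCE B (Python) =====
-- def is_decreasing(lon):
--     if len(lon) == 0:
--         return True
--     return lon == [lon[0] - i for i in range(len(lon))]
-- ===== Notes on version B (the rewrite author's own statement) =====
-- stated objective: alternative
-- what changed: B builds the full expected arithmetic sequence anchored at the first element with one comprehension over the index range and compares it to the input by whole-list equality, instead of A's early-return scan carrying a running prev.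
import Mathlib
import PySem

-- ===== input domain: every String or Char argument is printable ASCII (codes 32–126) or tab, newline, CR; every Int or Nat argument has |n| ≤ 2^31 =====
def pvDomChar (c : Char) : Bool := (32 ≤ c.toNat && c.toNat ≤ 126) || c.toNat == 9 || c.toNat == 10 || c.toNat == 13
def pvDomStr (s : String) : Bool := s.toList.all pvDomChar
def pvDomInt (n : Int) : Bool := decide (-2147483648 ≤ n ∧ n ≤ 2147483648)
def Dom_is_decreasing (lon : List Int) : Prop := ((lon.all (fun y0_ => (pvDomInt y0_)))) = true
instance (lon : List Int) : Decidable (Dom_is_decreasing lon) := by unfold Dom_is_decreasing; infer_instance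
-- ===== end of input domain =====

-- B builds the full expected arithmetic list and compares it to lon by whole-list equality,
-- instead of A's early-return scan carrying a running prev; same asymptotic cost, different decomposition.

-- ===== PORT A =====
-- loop 'for n in lon[1:]' carrying prev, early return False
def pvALoop (prev : Int) (rest : List Int) : Bool :=
  match rest with
  | [] => true
  | n :: t => if prev ≠ n + 1 then false else pvALoop n t

def is_decreasing (lon : List Int) : Bool :=
  match lon with
  | [] => true
  | h :: t => pvALoop h t

-- ===== PORT B =====
-- '[lon[0] - i for i in range(len(lon))]' then whole-list equality with lon
def is_decreasing_alt (lon : List Int) : Bool :=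
  match lon with
  | [] => true
  | h :: _ => decide (lon = (List.range lon.length).map (fun i : Nat => h - (i : Int)))

-- ===== PRECONDITION & SPEC =====
def Spec_is_decreasing (lon : List Int) (out : Bool) : Prop := out = is_decreasing_alt lon
instance (lon : List Int) (out : Bool) : Decidable (Spec_is_decreasing lon out) := by unfold Spec_is_decreasing; infer_instance

-- ===== CLAIM (what is proved, stated in full; the proofs are below) =====
def Claim_equal_is_decreasing : Prop := ∀ (lon : List Int), Dom_is_decreasing lon → Spec_is_decreasing lon (is_decreasing lon)

-- ===== LEMMAS AND PROOFS =====
theorem pvALoop_eq_decide (t : List Int) :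
    ∀ (prev : Int), pvALoop prev t = decide (t = (List.range t.length).map (fun i : Nat => prev - ((i : Int) + 1))) := by
  induction t with
  | nil => intro prev; rfl
  | cons x t ih =>
    intro prev
    simp only [pvALoop, List.length_cons, List.range_succ_eq_map, List.map_cons, List.map_map]
    by_cases hx : prev = x + 1
    · have h1 : ¬ prev ≠ x + 1 := by omega
      simp only [if_neg h1, ih x]
      have hhead : prev - ((0 : Int) + 1) = x := by omega
      have hfun : (fun i : Nat => prev - ((i : Int) + 1)) ∘ (· + 1) = fun i : Nat => x - ((i : Int) + 1) := by
        funext j; simp only [Function.comp]; push_cast; omega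
      simp only [decide_eq_decide, hfun, Nat.cast_zero, hhead]
      simp
    · have h1 : prev ≠ x + 1 := hx
      simp only [if_pos h1]
      have hx' : x ≠ prev - ((0 : Int) + 1) := by omega
      symm
      simp only [decide_eq_false_iff_not]
      intro h
      exact hx' (by injection h)

-- ===== VERDICT (by name: the statement is the Claim_ definition above) =====
theorem is_decreasing_spec : Claim_equal_is_decreasing := by
  intro lon _
  unfold Spec_is_decreasing
  cases lon with
  | nil => rfl
  | cons h t =>
    show pvALoop h t = decide (h :: t = (List.range (h :: t).length).map (fun i : Nat => h - (i : Int)))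
    rw [pvALoop_eq_decide t h]
    simp only [List.length_cons, List.range_succ_eq_map, List.map_cons, List.map_map]
    have hfun : (fun i : Nat => h - (i : Int)) ∘ (· + 1) = fun i : Nat => h - ((i : Int) + 1) := by
      funext j; simp only [Function.comp]; push_cast; ring
    simp only [decide_eq_decide, hfun, Nat.cast_zero, sub_zero]
    simp
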